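-- pv_equiv track=rewrite | github.com/Sosbx/PLanning | core/Constantes/QuotasTracking.py | _get_weekday_group
-- ===== SOURCE A (Python) =====
-- from typing import Dict, List, Optional, Union, Tuple
--
-- def _get_weekday_group(post_type: str) -> Optional[str]:
--     """Retourne le groupe de semaine d'un poste."""
--     weekday_groups = {
--         "XM": ["CM", "HM", "SM", "RM"],
--         "XmM": ["MM"],
--         "XA": ["CA", "HA", "SA", "RA"],
--         "XS": ["CS", "HS", "SS", "RS"],
--         "Vm": ["ML"],
--         "Va": ["AL", "AC"],
--         "NMC": ["NM", "NC", "NA"]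
--     }
--
--     for group, posts in weekday_groups.items():
--         if post_type in posts:
--             return group
--     return None
-- ===== SOURCE B (Python) =====
-- def _get_weekday_group(post_type):
--     """Retourne le groupe de semaine d'un poste."""
--     post_to_group = {
--         "CM": "XM", "HM": "XM", "SM": "XM", "RM": "XM",
--         "MM": "XmM",
--         "CA": "XA", "HA": "XA", "SA": "XA", "RA": "XA",
--         "CS": "XS", "HS": "XS", "SS": "XS", "RS": "XS",
--         "ML": "Vm",
--         "AL": "Va", "AC": "Va",
--         "NM": "NMC", "NC": "NMC", "NA": "NMC",
--     }
--     return post_to_group.get(post_type)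
-- ===== Notes on version B (the rewrite author's own statement) =====
-- stated objective: idiomatic
-- what changed: Replaced the loop over group->posts lists with per-group membership tests by a single flat post->group dictionary and one .get() lookup.
import Mathlib
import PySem

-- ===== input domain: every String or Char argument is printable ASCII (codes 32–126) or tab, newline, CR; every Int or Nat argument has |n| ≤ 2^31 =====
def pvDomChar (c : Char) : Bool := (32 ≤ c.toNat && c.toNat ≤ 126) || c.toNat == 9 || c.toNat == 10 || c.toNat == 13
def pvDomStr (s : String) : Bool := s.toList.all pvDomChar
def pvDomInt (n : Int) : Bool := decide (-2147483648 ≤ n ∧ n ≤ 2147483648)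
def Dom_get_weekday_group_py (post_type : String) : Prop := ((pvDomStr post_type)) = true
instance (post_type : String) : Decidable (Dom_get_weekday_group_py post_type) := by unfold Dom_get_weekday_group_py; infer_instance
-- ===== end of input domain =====

-- B replaces A's loop over group->posts lists (with a membership scan per group) by one
-- flat post->group dictionary and a single .get() lookup (more idiomatic; same results).

-- ===== PORT A =====
-- the weekday_groups dict of A, as an insertion-ordered Dict (its items are iterated)
def pvWeekdayGroups : PySem.Dict String (List String) :=
  PySem.Dict.ofList
    [ ("XM", ["CM", "HM", "SM", "RM"])
    , ("XmM", ["MM"])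
    , ("XA", ["CA", "HA", "SA", "RA"])
    , ("XS", ["CS", "HS", "SS", "RS"])
    , ("Vm", ["ML"])
    , ("Va", ["AL", "AC"])
    , ("NMC", ["NM", "NC", "NA"]) ]

-- the 'for group, posts in weekday_groups.items(): if post_type in posts: return group' loop
def pvGroupLoop (post_type : String) : List (String × List String) → Option String
  | [] => none
  | (group, posts) :: rest =>
      if posts.contains post_type then some group else pvGroupLoop post_type rest

def get_weekday_group_py (post_type : String) : Option String :=
  pvGroupLoop post_type pvWeekdayGroups.items

-- ===== PORT B =====
def pvPostToGroup : PySem.Dict String String :=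
  PySem.Dict.ofList
    [ ("CM", "XM"), ("HM", "XM"), ("SM", "XM"), ("RM", "XM")
    , ("MM", "XmM")
    , ("CA", "XA"), ("HA", "XA"), ("SA", "XA"), ("RA", "XA")
    , ("CS", "XS"), ("HS", "XS"), ("SS", "XS"), ("RS", "XS")
    , ("ML", "Vm")
    , ("AL", "Va"), ("AC", "Va")
    , ("NM", "NMC"), ("NC", "NMC"), ("NA", "NMC") ]

def get_weekday_group_py_alt (post_type : String) : Option String :=
  pvPostToGroup.get? post_type

-- ===== PRECONDITION & SPEC =====
def Spec_get_weekday_group_py (post_type : String) (out : Option String) : Prop := out = get_weekday_group_py_alt post_type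
instance (post_type : String) (out : Option String) : Decidable (Spec_get_weekday_group_py post_type out) := by unfold Spec_get_weekday_group_py; infer_instance

-- ===== CLAIM (what is proved, stated in full; the proofs are below) =====
def Claim_equal_get_weekday_group_py : Prop := ∀ (post_type : String), Dom_get_weekday_group_py post_type → Spec_get_weekday_group_py post_type (get_weekday_group_py post_type)

-- ===== LEMMAS AND PROOFS =====
theorem pvGroups_items : pvWeekdayGroups.items =
    [ ("XM", ["CM", "HM", "SM", "RM"])
    , ("XmM", ["MM"])
    , ("XA", ["CA", "HA", "SA", "RA"])
    , ("XS", ["CS", "HS", "SS", "RS"])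
    , ("Vm", ["ML"])
    , ("Va", ["AL", "AC"])
    , ("NMC", ["NM", "NC", "NA"]) ] := by decide

theorem pvFlat_mk : pvPostToGroup = PySem.Dict.mk
    [ ("CM", "XM"), ("HM", "XM"), ("SM", "XM"), ("RM", "XM")
    , ("MM", "XmM")
    , ("CA", "XA"), ("HA", "XA"), ("SA", "XA"), ("RA", "XA")
    , ("CS", "XS"), ("HS", "XS"), ("SS", "XS"), ("RS", "XS")
    , ("ML", "Vm")
    , ("AL", "Va"), ("AC", "Va")
    , ("NM", "NMC"), ("NC", "NMC"), ("NA", "NMC") ] := by decide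

-- ===== VERDICT (by name: the statement is the Claim_ definition above) =====
theorem get_weekday_group_py_spec : Claim_equal_get_weekday_group_py := by
  intro s _
  unfold Spec_get_weekday_group_py get_weekday_group_py get_weekday_group_py_alt
  by_cases h0 : s = "CM"
  · subst h0; decide
  by_cases h1 : s = "HM"
  · subst h1; decide
  by_cases h2 : s = "SM"
  · subst h2; decide
  by_cases h3 : s = "RM"
  · subst h3; decide
  by_cases h4 : s = "MM"
  · subst h4; decide
  by_cases h5 : s = "CA"
  · subst h5; decide
  by_cases h6 : s = "HA"
  · subst h6; decide
  by_cases h7 : s = "SA"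
  · subst h7; decide
  by_cases h8 : s = "RA"
  · subst h8; decide
  by_cases h9 : s = "CS"
  · subst h9; decide
  by_cases h10 : s = "HS"
  · subst h10; decide
  by_cases h11 : s = "SS"
  · subst h11; decide
  by_cases h12 : s = "RS"
  · subst h12; decide
  by_cases h13 : s = "ML"
  · subst h13; decide
  by_cases h14 : s = "AL"
  · subst h14; decide
  by_cases h15 : s = "AC"
  · subst h15; decide
  by_cases h16 : s = "NM"
  · subst h16; decide
  by_cases h17 : s = "NC"
  · subst h17; decide
  by_cases h18 : s = "NA"
  · subst h18; decide
  rw [pvGroups_items, pvFlat_mk]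
  simp only [pvGroupLoop, PySem.Dict.get?_mk_cons, List.contains_cons, List.contains_nil,
    Bool.or_false, Bool.or_eq_true, beq_iff_eq]
  simp_all [eq_comm, PySem.Dict.get?]
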